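-- pv_equiv track=rewrite | github.com/NicolaasZA/adventofcode | src/2023/14/shared.py | weigh
-- ===== SOURCE A (Python) =====
-- ROUND_STONE = 'O'
--
-- def weigh(grid):
--     _weight = 0
--
--     row_weight = len(grid)
--     for row in range(0, len(grid)):
--         _r = ''.join(grid[row])
--         _weight += (row_weight * _r.count(ROUND_STONE))
--         row_weight -= 1
--     return _weight
-- ===== SOURCE B (Python) =====
-- ROUND_STONE = 'O'
--
-- def weigh(grid):
--     # single forward pass: running prefix count of round stones, summed each row
--     seen = 0
--     total = 0
--     for row in grid:
--         seen += ''.join(row).count(ROUND_STONE)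
--         total += seen
--     return total
-- ===== Notes on version B (the rewrite author's own statement) =====
-- stated objective: simpler
-- what changed: Replaces the indexed loop with an explicit decreasing row weight by a single forward pass that keeps a running prefix count of round stones and adds it to the total each row (prefix-sum decomposition, no indexing and no weight counter).
import Mathlib
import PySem

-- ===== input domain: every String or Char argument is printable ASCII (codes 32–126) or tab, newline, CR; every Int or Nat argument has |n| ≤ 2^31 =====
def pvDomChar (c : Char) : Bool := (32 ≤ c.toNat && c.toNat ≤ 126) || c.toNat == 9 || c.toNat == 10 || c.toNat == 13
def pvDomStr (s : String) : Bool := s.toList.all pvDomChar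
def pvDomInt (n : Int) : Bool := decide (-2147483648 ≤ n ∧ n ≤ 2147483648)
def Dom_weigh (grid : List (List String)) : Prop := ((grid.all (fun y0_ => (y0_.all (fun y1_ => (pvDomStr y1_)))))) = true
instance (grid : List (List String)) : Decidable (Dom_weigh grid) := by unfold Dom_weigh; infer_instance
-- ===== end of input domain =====

-- B replaces the explicit decreasing row weight and index loop of A by a single
-- forward pass keeping a running prefix count of round stones (simpler decomposition).

-- ===== PORT A =====
def weigh (grid : List (List String)) : Int :=
  ((PySem.List.pyRange 0 (grid.length : Int) 1).foldl
    (fun (st : Int × Int) row =>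
      let _r := PySem.Str.join "" (PySem.List.pyGetD grid row [])
      (st.1 + st.2 * (PySem.Str.count _r "O" : Int), st.2 - 1))
    (0, (grid.length : Int))).1

-- ===== PORT B =====
def weigh_alt (grid : List (List String)) : Int :=
  (grid.foldl
    (fun (st : Int × Int) row =>
      let seen := st.1 + (PySem.Str.count (PySem.Str.join "" row) "O" : Int)
      (seen, st.2 + seen))
    (0, 0)).2

-- ===== PRECONDITION & SPEC =====
def Spec_weigh (grid : List (List String)) (out : Int) : Prop := out = weigh_alt grid
instance (grid : List (List String)) (out : Int) : Decidable (Spec_weigh grid out) := by unfold Spec_weigh; infer_instance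

-- ===== CLAIM (what is proved, stated in full; the proofs are below) =====
def Claim_equal_weigh : Prop := ∀ (grid : List (List String)), Dom_weigh grid → Spec_weigh grid (weigh grid)

-- ===== LEMMAS AND PROOFS =====

-- per-row round-stone count
def pvCnt (row : List String) : Int := (PySem.Str.count (PySem.Str.join "" row) "O" : Int)

-- A's loop body as a plain fold over the rows
def pvFA (l : List (List String)) (s w : Int) : Int × Int :=
  l.foldl (fun (st : Int × Int) r => (st.1 + st.2 * pvCnt r, st.2 - 1)) (s, w)

def pvFB (l : List (List String)) (s t : Int) : Int × Int :=
  l.foldl (fun (st : Int × Int) r =>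
    let seen := st.1 + pvCnt r
    (seen, st.2 + seen)) (s, t)

theorem pvFA_shift (l : List (List String)) (s w : Int) :
    (pvFA l s w).1 = s + (pvFA l 0 w).1 := by
  induction l generalizing s w with
  | nil => simp [pvFA]
  | cons r l ih =>
      simp only [pvFA, List.foldl_cons] at *
      rw [ih, ih (0 + w * pvCnt r)]
      ring

theorem pvFB_shift (l : List (List String)) (s t : Int) :
    (pvFB l s t).2 = t + (pvFB l s 0).2 := by
  induction l generalizing s t with
  | nil => simp [pvFB]
  | cons r l ih =>
      simp only [pvFB, List.foldl_cons] at *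
      rw [ih, ih (s + pvCnt r) (0 + (s + pvCnt r))]
      ring

theorem pvFB_eq_pvFA (l : List (List String)) (s : Int) :
    (pvFB l s 0).2 = (pvFA l 0 (l.length : Int)).1 + (l.length : Int) * s := by
  induction l generalizing s with
  | nil => simp [pvFA, pvFB]
  | cons r l ih =>
      have hB : pvFB (r :: l) s 0 = pvFB l (s + pvCnt r) (0 + (s + pvCnt r)) := rfl
      have hA : pvFA (r :: l) 0 (((r :: l).length : Int)) =
          pvFA l (0 + ((r :: l).length : Int) * pvCnt r) (((r :: l).length : Int) - 1) := rfl
      have hlen : (((r :: l).length : Int) - 1) = (l.length : Int) := by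
        push_cast [List.length_cons]; ring
      rw [hB, pvFB_shift, ih (s + pvCnt r), hA, hlen,
        pvFA_shift l (0 + ((r :: l).length : Int) * pvCnt r) (l.length : Int)]
      push_cast [List.length_cons]
      ring

-- ===== VERDICT (by name: the statement is the Claim_ definition above) =====
theorem weigh_spec : Claim_equal_weigh := by
  intro grid _
  show weigh grid = weigh_alt grid
  unfold weigh weigh_alt
  rw [PySem.List.foldl_pyRange_zero_pyGetD' grid []
      (fun (st : Int × Int) r =>
        (st.1 + st.2 * (PySem.Str.count (PySem.Str.join "" r) "O" : Int), st.2 - 1))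
      (0, (grid.length : Int))]
  have := pvFB_eq_pvFA grid 0
  simp only [pvFA, pvFB, pvCnt] at this
  rw [this]
  ring
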